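-- pv_equiv track=rewrite | github.com/youngseo1108/HS21-Informatik1 | EX5/EX17T04.py | get_possible_nrs
-- ===== SOURCE A (Python) =====
-- wa_nrs = ["0781111119", "0792653913", "0797763139", "0792793193", "0781139022", "0764320165"]
--
-- def get_possible_nrs(n):
--     n = ''.join(n.split(' '))
--     phone_num = ''
--     possible_nrs_for_juliet = []
--
--     # append one digit at every location in the number
--     for guess_idx in range(2, len(n)+1):
--         for guess_nr in range(10):
--             phone_num = n[:guess_idx] + str(guess_nr) + n[guess_idx:]
--
--             # check whether number is in our list
--             if phone_num in wa_nrs and not phone_num in possible_nrs_for_juliet: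
--                 possible_nrs_for_juliet.append(phone_num)
--
--     return possible_nrs_for_juliet
-- ===== SOURCE B (Python) =====
-- wa_nrs = ["0781111119", "0792653913", "0797763139", "0792793193", "0781139022", "0764320165"]
--
-- def get_possible_nrs(n):
--     n = ''.join(n.split(' '))
--     # scan the fixed target list instead of generating 10 candidates per position
--     hits = []
--     for wa in wa_nrs:
--         if len(wa) == len(n) + 1:
--             for p in range(2, len(n) + 1):
--                 if wa[:p] == n[:p] and wa[p+1:] == n[p:]:
--                     hits.append((p, wa))
--     # A emits by (position, inserted digit); since two hits at the same position
--     # share the prefix n[:p], sorting the (p, wa) pairs gives exactly that order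
--     hits.sort()
--     possible = []
--     for _, wa in hits:
--         if wa not in possible:
--             possible.append(wa)
--     return possible
-- ===== Notes on version B (the rewrite author's own statement) =====
-- stated objective: alternative
-- what changed: Instead of generating all 10 insertion candidates at every position and testing membership in wa_nrs, B scans the fixed target list once, records each (position, target) whose prefix/suffix match the input, sorts the hits (which reproduces A's position-then-digit emission order because hits at the same position share the prefix), and deduplicates.
import Mathlib
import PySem

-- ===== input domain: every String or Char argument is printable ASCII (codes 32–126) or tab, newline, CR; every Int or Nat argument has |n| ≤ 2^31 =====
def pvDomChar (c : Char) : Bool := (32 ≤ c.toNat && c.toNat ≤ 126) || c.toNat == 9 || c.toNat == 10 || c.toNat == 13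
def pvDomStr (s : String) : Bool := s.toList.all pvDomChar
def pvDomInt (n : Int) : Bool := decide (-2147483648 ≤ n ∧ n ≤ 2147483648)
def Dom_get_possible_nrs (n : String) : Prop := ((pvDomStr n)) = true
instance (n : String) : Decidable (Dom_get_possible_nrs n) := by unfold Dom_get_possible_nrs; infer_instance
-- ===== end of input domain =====

-- B scans the fixed target list for prefix/suffix matches and sorts the hits instead of
-- generating ten insertion candidates per position and testing membership (objective: alternative).

-- ===== PORT A =====
def wa_nrs : List String :=
  ["0781111119", "0792653913", "0797763139", "0792793193", "0781139022", "0764320165"]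

-- n = ''.join(n.split(' '))   (split? is always `some` here since the separator " " is non-empty)
def pvStripA (n : String) : String := PySem.Str.join "" ((PySem.Str.split? n " ").getD [])

def pvACore (s : String) : List String :=
  (PySem.List.pyRange 2 (PySem.Str.len s + 1)).foldl (fun acc guess_idx =>
    (PySem.List.pyRange 0 10).foldl (fun acc guess_nr =>
      let phone_num := PySem.Str.slice s none (some guess_idx) ++ PySem.Int.toStr guess_nr
          ++ PySem.Str.slice s (some guess_idx) none
      if phone_num ∈ wa_nrs ∧ phone_num ∉ acc then acc ++ [phone_num] else acc) acc) []

def get_possible_nrs (n : String) : List String := pvACore (pvStripA n)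

-- ===== PORT B =====
def pvStripB (n : String) : String := PySem.Str.join "" ((PySem.Str.split? n " ").getD [])

def pvBHits (s : String) : List (Int × String) :=
  wa_nrs.foldl (fun hits wa =>
    if PySem.Str.len wa = PySem.Str.len s + 1 then
      (PySem.List.pyRange 2 (PySem.Str.len s + 1)).foldl (fun hits p =>
        if PySem.Str.slice wa none (some p) = PySem.Str.slice s none (some p) ∧
           PySem.Str.slice wa (some (p + 1)) none = PySem.Str.slice s (some p) none
        then hits ++ [(p, wa)] else hits) hits
    else hits) []

def pvBCore (s : String) : List String :=
  (PySem.List.sorted2 (pvBHits s) Prod.fst Prod.snd).foldl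
    (fun possible pw => if pw.2 ∉ possible then possible ++ [pw.2] else possible) []

def get_possible_nrs_alt (n : String) : List String := pvBCore (pvStripB n)

-- ===== PRECONDITION & SPEC =====
def Spec_get_possible_nrs (n : String) (out : List String) : Prop := out = get_possible_nrs_alt n
instance (n : String) (out : List String) : Decidable (Spec_get_possible_nrs n out) := by
  unfold Spec_get_possible_nrs; infer_instance

-- ===== CLAIM (what is proved, stated in full; the proofs are below) =====
def Claim_equal_get_possible_nrs : Prop :=
  ∀ (n : String), Dom_get_possible_nrs n → Spec_get_possible_nrs n (get_possible_nrs n)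

-- ===== LEMMAS AND PROOFS =====

-- the candidate string n[:p] + str(d) + n[p:]
def pvCand (s : String) (p d : Int) : String :=
  PySem.Str.slice s none (some p) ++ PySem.Int.toStr d ++ PySem.Str.slice s (some p) none

def pvDigitChar (d : Int) : Char := Char.ofNat (48 + d.toNat)

-- the (position, digit) pairs A enumerates, in A's order
def pvPairs (s : String) : List (Int × Int) :=
  (PySem.List.pyRange 2 (PySem.Str.len s + 1)).flatMap
    (fun p => (PySem.List.pyRange 0 10).map (fun d => (p, d)))

-- the hit list in A's (position, digit) order
def pvH (s : String) : List (Int × String) :=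
  ((pvPairs s).filter (fun pd => decide (pvCand s pd.1 pd.2 ∈ wa_nrs))).map
    (fun pd => (pd.1, pvCand s pd.1 pd.2))

-- B's per-target match condition
abbrev pvCond (s wa : String) (p : Int) : Prop :=
  PySem.Str.slice wa none (some p) = PySem.Str.slice s none (some p) ∧
  PySem.Str.slice wa (some (p + 1)) none = PySem.Str.slice s (some p) none

-- B's hit list as a flatMap
def pvBFlat (s : String) : List (Int × String) :=
  wa_nrs.flatMap (fun wa =>
    if PySem.Str.len wa = PySem.Str.len s + 1 then
      ((PySem.List.pyRange 2 (PySem.Str.len s + 1)).filter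
        (fun p => decide (pvCond s wa p))).map (fun p => (p, wa))
    else [])


lemma list_lt_mid (pre t : List Char) {c1 c2 : Char} (h : c1 < c2) :
    pre ++ c1 :: t < pre ++ c2 :: t := by
  show List.lt (pre ++ c1 :: t) (pre ++ c2 :: t)
  rw [List.lt_iff_lex_lt]
  induction pre with
  | nil => exact List.Lex.rel h
  | cons x xs ih => exact List.Lex.cons ih

lemma mem_block {s wa : String} {x : Int × String}
    (hx : x ∈ (if PySem.Str.len wa = PySem.Str.len s + 1 then
        ((PySem.List.pyRange 2 (PySem.Str.len s + 1)).filter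
          (fun p => decide (pvCond s wa p))).map (fun p => (p, wa))
      else ([] : List (Int × String)))) : x.2 = wa := by
  split at hx
  · rw [List.mem_map] at hx
    obtain ⟨p, _, rfl⟩ := hx
    rfl
  · simp at hx

lemma pyRange_pairwise (a b : Int) : List.Pairwise (· < ·) (PySem.List.pyRange a b) := by
  suffices H : ∀ (k : Nat) (a : Int), (b - a).toNat = k →
      List.Pairwise (· < ·) (PySem.List.pyRange a b) from H _ a rfl
  intro k
  induction k with
  | zero =>
    intro a hk
    have he : PySem.List.pyRange a b = [] := by
      rw [List.eq_nil_iff_forall_not_mem]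
      intro x hx
      rw [PySem.List.mem_pyRange_one] at hx
      omega
    rw [he]
    exact List.Pairwise.nil
  | succ k ih =>
    intro a hk
    by_cases hab : a < b
    · rw [PySem.List.pyRange_one_cons hab]
      refine List.Pairwise.cons ?_ (ih (a + 1) (by omega))
      intro x hx
      rw [PySem.List.mem_pyRange_one] at hx
      omega
    · have he : PySem.List.pyRange a b = [] := by
        rw [List.eq_nil_iff_forall_not_mem]
        intro x hx
        rw [PySem.List.mem_pyRange_one] at hx
        omega
      rw [he]
      exact List.Pairwise.nil

lemma pyRange_nodup (a b : Int) : (PySem.List.pyRange a b).Nodup := by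
  exact List.Pairwise.imp (fun h => ne_of_lt h) (pyRange_pairwise a b)

lemma cand_toList (s : String) (p d : Int) (hp : 0 ≤ p) :
    (pvCand s p d).toList =
      s.toList.take p.toNat ++ PySem.Int.toChars d ++ s.toList.drop p.toNat := by
  have h2 := PySem.List.slice_to s.toList (b := p) hp
  have h3 := PySem.List.slice_from s.toList (a := p) hp
  simp [pvCand, String.toList_append, PySem.Str.toList_slice, PySem.Chars.slice_eq_listSlice,
        h2, h3, PySem.Int.toList_toStr]

lemma digit_toChars (d : Int) (h0 : 0 ≤ d) (h1 : d < 10) :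
    PySem.Int.toChars d = [pvDigitChar d] := by
  interval_cases d <;> rfl

set_option maxRecDepth 2048 in
lemma digitChar_lt {d1 d2 : Int} (h0 : 0 ≤ d1) (h : d1 < d2) (h1 : d2 < 10) :
    pvDigitChar d1 < pvDigitChar d2 := by
  have h2 : d1 < 10 := by omega
  interval_cases d1 <;> interval_cases d2 <;> first | decide | omega

set_option maxRecDepth 2048 in
lemma pvDigitChar_toNat (d : Int) (h0 : 0 ≤ d) (h1 : d < 10) :
    (pvDigitChar d).toNat = 48 + d.toNat := by
  interval_cases d <;> rfl

lemma digitChar_inj {d1 d2 : Int} (h0 : 0 ≤ d1) (h1 : d1 < 10) (h0' : 0 ≤ d2) (h1' : d2 < 10)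
    (h : pvDigitChar d1 = pvDigitChar d2) : d1 = d2 := by
  have ht := congrArg Char.toNat h
  rw [pvDigitChar_toNat d1 h0 h1, pvDigitChar_toNat d2 h0' h1'] at ht
  omega

def pvDigits : List Char := ['0','1','2','3','4','5','6','7','8','9']

lemma wa_chars : ∀ wa ∈ wa_nrs, ∀ c ∈ wa.toList, c ∈ pvDigits := by
  intro wa hwa
  unfold wa_nrs at hwa
  fin_cases hwa
  · rw [show "0781111119".toList = ['0','7','8','1','1','1','1','1','1','9'] from rfl]
    intro c hc
    fin_cases hc <;> decide
  · rw [show "0792653913".toList = ['0','7','9','2','6','5','3','9','1','3'] from rfl]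
    intro c hc
    fin_cases hc <;> decide
  · rw [show "0797763139".toList = ['0','7','9','7','7','6','3','1','3','9'] from rfl]
    intro c hc
    fin_cases hc <;> decide
  · rw [show "0792793193".toList = ['0','7','9','2','7','9','3','1','9','3'] from rfl]
    intro c hc
    fin_cases hc <;> decide
  · rw [show "0781139022".toList = ['0','7','8','1','1','3','9','0','2','2'] from rfl]
    intro c hc
    fin_cases hc <;> decide
  · rw [show "0764320165".toList = ['0','7','6','4','3','2','0','1','6','5'] from rfl]
    intro c hc
    fin_cases hc <;> decide

lemma digits_complete : ∀ c ∈ pvDigits, ∃ d : Int, 0 ≤ d ∧ d < 10 ∧ pvDigitChar d = c := by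
  intro c hc
  fin_cases hc
  · exact ⟨0, by norm_num, by norm_num, by decide⟩
  · exact ⟨1, by norm_num, by norm_num, by decide⟩
  · exact ⟨2, by norm_num, by norm_num, by decide⟩
  · exact ⟨3, by norm_num, by norm_num, by decide⟩
  · exact ⟨4, by norm_num, by norm_num, by decide⟩
  · exact ⟨5, by norm_num, by norm_num, by decide⟩
  · exact ⟨6, by norm_num, by norm_num, by decide⟩
  · exact ⟨7, by norm_num, by norm_num, by decide⟩
  · exact ⟨8, by norm_num, by norm_num, by decide⟩
  · exact ⟨9, by norm_num, by norm_num, by decide⟩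

lemma wa_digit_idx : ∀ wa ∈ wa_nrs, ∀ c ∈ wa.toList,
    ∃ d : Int, 0 ≤ d ∧ d < 10 ∧ pvDigitChar d = c :=
  fun wa hwa c hc => digits_complete c (wa_chars wa hwa c hc)

lemma wa_nodup : wa_nrs.Nodup := by decide

-- candidate с d matched against a target: forward direction
lemma cand_eq_imp {s wa : String} {p d : Int} (hp2 : 2 ≤ p) (hpN : p < PySem.Str.len s + 1)
    (h0 : 0 ≤ d) (h1 : d < 10) (h : pvCand s p d = wa) :
    PySem.Str.len wa = PySem.Str.len s + 1 ∧ pvCond s wa p := by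
  subst h
  have hp0 : 0 ≤ p := by omega
  have hN : p.toNat ≤ s.toList.length := by
    rw [PySem.Str.len_eq] at hpN; omega
  have hT : (s.toList.take p.toNat).length = p.toNat := by
    rw [List.length_take]; omega
  have hW : (pvCand s p d).toList =
      s.toList.take p.toNat ++ [pvDigitChar d] ++ s.toList.drop p.toNat := by
    rw [cand_toList s p d hp0, digit_toChars d h0 h1]
  refine ⟨?_, ?_, ?_⟩
  · rw [PySem.Str.len_eq, PySem.Str.len_eq, hW]
    simp only [List.length_append, List.length_take, List.length_drop, List.length_cons,
      List.length_nil]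
    push_cast
    omega
  · rw [← String.toList_inj, PySem.Str.toList_slice, PySem.Str.toList_slice,
        PySem.Chars.slice_eq_listSlice, PySem.Chars.slice_eq_listSlice,
        PySem.List.slice_to _ hp0, PySem.List.slice_to _ hp0, hW, List.append_assoc]
    exact List.take_left' hT
  · rw [← String.toList_inj, PySem.Str.toList_slice, PySem.Str.toList_slice,
        PySem.Chars.slice_eq_listSlice, PySem.Chars.slice_eq_listSlice,
        PySem.List.slice_from _ (by omega : (0:Int) ≤ p + 1), PySem.List.slice_from _ hp0, hW]
    have hT1 : (s.toList.take p.toNat ++ [pvDigitChar d]).length = (p + 1).toNat := by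
      simp only [List.length_append, List.length_cons, List.length_nil, hT]
      omega
    exact List.drop_left' hT1

-- backward direction: a matching target is a candidate for exactly one digit
lemma cond_imp_cand {s wa : String} {p : Int} (hwa : wa ∈ wa_nrs) (hp2 : 2 ≤ p)
    (hpN : p < PySem.Str.len s + 1) (hlen : PySem.Str.len wa = PySem.Str.len s + 1)
    (hc : pvCond s wa p) : ∃ d, 0 ≤ d ∧ d < 10 ∧ pvCand s p d = wa := by
  have hp0 : 0 ≤ p := by omega
  have hN : p.toNat ≤ s.toList.length := by rw [PySem.Str.len_eq] at hpN; omega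
  have hWlen : wa.toList.length = s.toList.length + 1 := by
    rw [PySem.Str.len_eq, PySem.Str.len_eq] at hlen; omega
  have hlt : p.toNat < wa.toList.length := by omega
  obtain ⟨d, hd0, hd1, hdc⟩ :=
    wa_digit_idx wa hwa (wa.toList[p.toNat]'hlt) (List.getElem_mem hlt)
  refine ⟨d, hd0, hd1, ?_⟩
  rw [← String.toList_inj, cand_toList s p _ hp0, digit_toChars _ hd0 hd1, hdc]
  obtain ⟨hc1, hc2⟩ := hc
  have ht : wa.toList.take p.toNat = s.toList.take p.toNat := by
    have hq := congrArg String.toList hc1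
    rwa [PySem.Str.toList_slice, PySem.Str.toList_slice, PySem.Chars.slice_eq_listSlice,
        PySem.Chars.slice_eq_listSlice, PySem.List.slice_to _ hp0,
        PySem.List.slice_to _ hp0] at hq
  have hd : wa.toList.drop (p.toNat + 1) = s.toList.drop p.toNat := by
    have hq := congrArg String.toList hc2
    rw [PySem.Str.toList_slice, PySem.Str.toList_slice, PySem.Chars.slice_eq_listSlice,
        PySem.Chars.slice_eq_listSlice, PySem.List.slice_from _ (by omega : (0:Int) ≤ p + 1),
        PySem.List.slice_from _ hp0] at hq
    have hpn : (p + 1).toNat = p.toNat + 1 := by omega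
    rwa [hpn] at hq
  conv_rhs => rw [← List.take_append_drop p.toNat wa.toList, ← List.getElem_cons_drop hlt]
  rw [ht, hd]
  simp

lemma cand_inj_d {s : String} {p d1 d2 : Int} (hp : 0 ≤ p)
    (h0 : 0 ≤ d1) (h1 : d1 < 10) (h0' : 0 ≤ d2) (h1' : d2 < 10)
    (h : pvCand s p d1 = pvCand s p d2) : d1 = d2 := by
  have hq := congrArg String.toList h
  rw [cand_toList s p d1 hp, cand_toList s p d2 hp, digit_toChars d1 h0 h1,
      digit_toChars d2 h0' h1', List.append_assoc, List.append_assoc] at hq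
  have hq2 := List.append_cancel_left hq
  simp only [List.cons_append, List.nil_append, List.cons.injEq] at hq2
  exact digitChar_inj h0 h1 h0' h1' hq2.1

lemma cand_lt_d {s : String} {p d1 d2 : Int} (hp : 0 ≤ p)
    (h0 : 0 ≤ d1) (h : d1 < d2) (h1 : d2 < 10) : pvCand s p d1 < pvCand s p d2 := by
  rw [String.lt_iff_toList_lt, cand_toList s p d1 hp, cand_toList s p d2 hp,
      digit_toChars d1 h0 (by omega), digit_toChars d2 (by omega) h1,
      List.append_assoc, List.append_assoc]
  simp only [List.singleton_append]
  exact list_lt_mid _ _ (digitChar_lt h0 h h1)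

-- A's nested loop is a deduplicating fold over pvPairs
lemma pvACore_eq (s : String) :
    pvACore s = PySem.Set.ofList
      (((pvPairs s).filter (fun pd => decide (pvCand s pd.1 pd.2 ∈ wa_nrs))).map
        (fun pd => pvCand s pd.1 pd.2)) := by
  have h1 : pvACore s = (pvPairs s).foldl
      (fun acc pd => if pvCand s pd.1 pd.2 ∈ wa_nrs ∧ pvCand s pd.1 pd.2 ∉ acc
        then acc ++ [pvCand s pd.1 pd.2] else acc) [] := by
    unfold pvACore pvPairs
    simp only [List.foldl_flatMap, List.foldl_map]
    rfl
  rw [h1]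
  have hc := PySem.List.foldl_congr_mem (pvPairs s)
      (fun acc pd => if pvCand s pd.1 pd.2 ∈ wa_nrs ∧ pvCand s pd.1 pd.2 ∉ acc
        then acc ++ [pvCand s pd.1 pd.2] else acc)
      (fun acc pd => if pvCand s pd.1 pd.2 ∈ wa_nrs
        then PySem.Set.add acc (pvCand s pd.1 pd.2) else acc) []
      (by
        intro acc pd _
        by_cases hm : pvCand s pd.1 pd.2 ∈ wa_nrs <;>
          by_cases ha : pvCand s pd.1 pd.2 ∈ acc <;>
            simp [PySem.Set.add, hm, ha])
  rw [hc, PySem.Set.ofList_eq_foldl, List.foldl_map, ← PySem.List.foldl_ite_eq_foldl_filter]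

-- B's hit loop is the flatMap pvBFlat
lemma pvBHits_eq (s : String) : pvBHits s = pvBFlat s := by
  unfold pvBHits pvBFlat
  have h := PySem.List.foldl_append_eq_flatMap
      (fun wa => if PySem.Str.len wa = PySem.Str.len s + 1 then
          ((PySem.List.pyRange 2 (PySem.Str.len s + 1)).filter
            (fun p => decide (pvCond s wa p))).map (fun p => (p, wa))
        else []) wa_nrs []
  rw [List.nil_append] at h
  rw [← h]
  apply PySem.List.foldl_congr_mem
  intro acc wa _
  by_cases hlen : PySem.Str.len wa = PySem.Str.len s + 1
  · rw [if_pos hlen, if_pos hlen]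
    exact PySem.List.foldl_append_ite (pvCond s wa) (fun p => (p, wa)) _ acc
  · rw [if_neg hlen, if_neg hlen, List.append_nil]

-- B's final loop deduplicates the sorted hit list
lemma pvBCore_eq (s : String) :
    pvBCore s = PySem.Set.ofList
      ((PySem.List.sorted2 (pvBHits s) Prod.fst Prod.snd).map Prod.snd) := by
  unfold pvBCore
  rw [PySem.Set.ofList_eq_foldl, List.foldl_map]
  apply PySem.List.foldl_congr_mem
  intro acc pw _
  by_cases h : pw.2 ∈ acc <;> simp [PySem.Set.add, h]

-- Python's tuple sort is the sort by the lexicographic key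
lemma sorted2_eq_sorted_lex (xs : List (Int × String)) :
    PySem.List.sorted2 xs Prod.fst Prod.snd = PySem.List.sorted xs (fun x => toLex x) := by
  rw [PySem.List.sorted_eq_foldl_insertBy]
  show List.foldl (fun acc x => PySem.List.insertBy
      (fun a b => decide (a.1 < b.1) || (!decide (b.1 < a.1) && decide (a.2 < b.2))) x acc) [] xs
    = List.foldl (fun acc x => PySem.List.insertBy
      (fun a b => decide ((toLex a : Lex (Int × String)) < toLex b)) x acc) [] xs
  congr 1
  funext acc x
  congr 1
  funext a b
  rcases lt_trichotomy a.1 b.1 with h | h | h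
  · have h' : ¬ b.1 < a.1 := by omega
    simp [h, h', Prod.Lex.lt_iff]
  · have h' : ¬ a.1 < b.1 := by omega
    have h'' : ¬ b.1 < a.1 := by omega
    by_cases h3 : a.2 < b.2 <;> simp [h, h', h'', h3, Prod.Lex.lt_iff]
  · have h' : ¬ a.1 < b.1 := by omega
    have h'' : a.1 ≠ b.1 := by omega
    simp [h, h', h'', Prod.Lex.lt_iff]

lemma pvPairs_pairwise (s : String) :
    List.Pairwise (fun x y : Int × Int => x.1 < y.1 ∨ (x.1 = y.1 ∧ x.2 < y.2)) (pvPairs s) := by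
  unfold pvPairs
  rw [List.pairwise_flatMap]
  constructor
  · intro p _
    rw [List.pairwise_map]
    exact List.Pairwise.imp (fun h => Or.inr ⟨rfl, h⟩) (pyRange_pairwise 0 10)
  · refine List.Pairwise.imp ?_ (pyRange_pairwise 2 (PySem.Str.len s + 1))
    intro p1 p2 hlt
    intro x hx y hy
    rw [List.mem_map] at hx hy
    obtain ⟨d1, _, rfl⟩ := hx
    obtain ⟨d2, _, rfl⟩ := hy
    exact Or.inl hlt

lemma pvPairs_mem {s : String} {pd : Int × Int} (h : pd ∈ pvPairs s) :
    2 ≤ pd.1 ∧ pd.1 < PySem.Str.len s + 1 ∧ 0 ≤ pd.2 ∧ pd.2 < 10 := by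
  unfold pvPairs at h
  rw [List.mem_flatMap] at h
  obtain ⟨p, hp, hx⟩ := h
  rw [PySem.List.mem_pyRange_one] at hp
  rw [List.mem_map] at hx
  obtain ⟨d, hd, rfl⟩ := hx
  rw [PySem.List.mem_pyRange_one] at hd
  exact ⟨hp.1, hp.2, hd.1, hd.2⟩

lemma mem_pvBFlat {s : String} {x : Int × String} :
    x ∈ pvBFlat s ↔ x.2 ∈ wa_nrs ∧ PySem.Str.len x.2 = PySem.Str.len s + 1 ∧
      2 ≤ x.1 ∧ x.1 < PySem.Str.len s + 1 ∧ pvCond s x.2 x.1 := by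
  unfold pvBFlat
  rw [List.mem_flatMap]
  constructor
  · rintro ⟨wa, hwa, hx⟩
    by_cases hlen : PySem.Str.len wa = PySem.Str.len s + 1
    · rw [if_pos hlen, List.mem_map] at hx
      obtain ⟨p, hp, rfl⟩ := hx
      rw [List.mem_filter] at hp
      obtain ⟨hp1, hp2⟩ := hp
      rw [PySem.List.mem_pyRange_one] at hp1
      rw [decide_eq_true_eq] at hp2
      exact ⟨hwa, hlen, hp1.1, hp1.2, hp2⟩
    · rw [if_neg hlen] at hx
      simp at hx
  · rintro ⟨h1, h2, h3, h4, h5⟩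
    refine ⟨x.2, h1, ?_⟩
    rw [if_pos h2, List.mem_map]
    refine ⟨x.1, ?_, rfl⟩
    rw [List.mem_filter, PySem.List.mem_pyRange_one, decide_eq_true_eq]
    exact ⟨⟨h3, h4⟩, h5⟩

lemma mem_pvH {s : String} {x : Int × String} :
    x ∈ pvH s ↔ ∃ p d, 2 ≤ p ∧ p < PySem.Str.len s + 1 ∧ 0 ≤ d ∧ d < 10 ∧
      pvCand s p d ∈ wa_nrs ∧ x = (p, pvCand s p d) := by
  unfold pvH
  rw [List.mem_map]
  constructor
  · rintro ⟨pd, hpd, rfl⟩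
    rw [List.mem_filter, decide_eq_true_eq] at hpd
    obtain ⟨hmem, hgood⟩ := hpd
    obtain ⟨ha, hb, hc, hd⟩ := pvPairs_mem hmem
    exact ⟨pd.1, pd.2, ha, hb, hc, hd, hgood, rfl⟩
  · rintro ⟨p, d, h1, h2, h3, h4, h5, rfl⟩
    refine ⟨(p, d), ?_, rfl⟩
    rw [List.mem_filter, decide_eq_true_eq]
    refine ⟨?_, h5⟩
    unfold pvPairs
    rw [List.mem_flatMap]
    exact ⟨p, by rw [PySem.List.mem_pyRange_one]; exact ⟨h1, h2⟩,
      by rw [List.mem_map]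
         exact ⟨d, by rw [PySem.List.mem_pyRange_one]; exact ⟨h3, h4⟩, rfl⟩⟩

lemma mem_pvH_iff_mem_pvBFlat {s : String} {x : Int × String} :
    x ∈ pvH s ↔ x ∈ pvBFlat s := by
  rw [mem_pvH, mem_pvBFlat]
  constructor
  · rintro ⟨p, d, h1, h2, h3, h4, h5, rfl⟩
    obtain ⟨hlen, hcond⟩ := cand_eq_imp h1 h2 h3 h4 rfl
    exact ⟨h5, hlen, h1, h2, hcond⟩
  · rintro ⟨h1, h2, h3, h4, h5⟩
    obtain ⟨d, hd0, hd1, hcd⟩ := cond_imp_cand h1 h3 h4 h2 h5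
    exact ⟨x.1, d, h3, h4, hd0, hd1, by rw [hcd]; exact h1, by rw [hcd]⟩

lemma pvBFlat_nodup (s : String) : (pvBFlat s).Nodup := by
  unfold pvBFlat
  rw [List.nodup_flatMap]
  constructor
  · intro wa _
    by_cases hlen : PySem.Str.len wa = PySem.Str.len s + 1
    · rw [if_pos hlen]
      refine List.Nodup.map ?_ (List.Nodup.filter _ (pyRange_nodup _ _))
      intro p q hpq
      simpa using congrArg Prod.fst hpq
    · rw [if_neg hlen]
      exact List.nodup_nil
  · exact List.Pairwise.imp
      (fun hne x hxa hxb => hne ((mem_block hxa).symm.trans (mem_block hxb))) wa_nodup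

lemma pvH_nodup (s : String) : (pvH s).Nodup := by
  unfold pvH
  have hn : (pvPairs s).Nodup := List.Pairwise.imp
    (fun {a b} h heq => by
      subst heq
      rcases h with h | ⟨_, h⟩ <;> exact lt_irrefl _ h)
    (pvPairs_pairwise s)
  refine List.Nodup.map_on ?_ (List.Nodup.filter _ hn)
  intro x hx y hy hxy
  have hxb := pvPairs_mem (List.mem_of_mem_filter hx)
  have hyb := pvPairs_mem (List.mem_of_mem_filter hy)
  rw [Prod.mk.injEq] at hxy
  obtain ⟨h1, h2⟩ := hxy
  rw [h1] at h2
  have hd : x.2 = y.2 := cand_inj_d (by omega) hxb.2.2.1 hxb.2.2.2 hyb.2.2.1 hyb.2.2.2 h2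
  exact Prod.ext h1 hd

lemma pvH_pairwise (s : String) :
    List.Pairwise (fun a b : Int × String => toLex a < toLex b) (pvH s) := by
  unfold pvH
  rw [List.pairwise_map]
  refine List.Pairwise.imp_of_mem ?_ (List.Pairwise.filter _ (pvPairs_pairwise s))
  intro a b ha hb hab
  have hA := pvPairs_mem (List.mem_of_mem_filter ha)
  have hB := pvPairs_mem (List.mem_of_mem_filter hb)
  rw [Prod.Lex.lt_iff]
  simp only [ofLex_toLex]
  rcases hab with h | ⟨heq, hd⟩
  · exact Or.inl h
  · refine Or.inr ⟨heq, ?_⟩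
    rw [heq]
    exact cand_lt_d (by omega) hA.2.2.1 hd hB.2.2.2

lemma sorted_hits_eq (s : String) :
    PySem.List.sorted2 (pvBHits s) Prod.fst Prod.snd = pvH s := by
  rw [pvBHits_eq, sorted2_eq_sorted_lex]
  refine PySem.List.sorted_eq_of_perm_of_pairwise_lt _ _ _ ?_ (pvH_pairwise s)
  exact (List.perm_ext_iff_of_nodup (pvH_nodup s) (pvBFlat_nodup s)).mpr
    (fun a => mem_pvH_iff_mem_pvBFlat)

lemma core_eq (s : String) : pvACore s = pvBCore s := by
  rw [pvACore_eq, pvBCore_eq, sorted_hits_eq]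
  unfold pvH
  rw [List.map_map]
  rfl

-- ===== VERDICT =====
theorem get_possible_nrs_spec : Claim_equal_get_possible_nrs := by
  intro n _
  unfold Spec_get_possible_nrs get_possible_nrs get_possible_nrs_alt pvStripA pvStripB
  exact core_eq _
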